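-- pv_equiv track=rewrite | github.com/marlonoliveira182/the-forge | projects/the-forge/archive/the-forge-v2.0.0-dev/src/core/mapping_engine.py | build_path_from_levels
-- ===== SOURCE A (Python) =====
-- from typing import Dict, List, Tuple, Optional, Any
--
-- def build_path_from_levels(
--
--     row: List[str],
--     level_indices: List[int],
--     all_rows: Optional[List[List[str]]] = None,
--     row_idx: Optional[int] = None
-- ) -> str:
--     """
--     Build a path from level columns, filling empty values from above.
--
--     Args:
--         row: Data row
--         level_indices: Indices of level columns
--         all_rows: All data rows for lookup
--         row_idx: Current row index
--
--     Returns: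
--         Built path string
--     """
--     path_parts = []
--
--     for idx in level_indices:
--         val = row[idx] if idx < len(row) else None
--
--         # If value is empty and we have all_rows, look up
--         if (val is None or str(val).strip() == '') and all_rows is not None and row_idx is not None:
--             # Search upward for non-empty value
--             for up_idx in range(row_idx - 1, -1, -1):
--                 if up_idx < len(all_rows) and idx < len(all_rows[up_idx]):
--                     up_val = all_rows[up_idx][idx]
--                     if up_val is not None and str(up_val).strip() != '':
--                         val = up_val
--                         break
--
--         if val is not None and str(val).strip() != '':
--             path_parts.append(str(val).strip())
--
--     return '.'.join(path_parts)
-- ===== SOURCE B (Python) =====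
-- def build_path_from_levels(row, level_indices, all_rows=None, row_idx=None):
--     def get(r, i):
--         n = len(r)
--         return r[i] if -n <= i < n else None
--
--     vals = {}
--     for idx in level_indices:
--         v = get(row, idx)
--         vals[idx] = v if v is not None and str(v).strip() != '' else None
--
--     if all_rows is not None and row_idx is not None:
--         missing = [idx for idx in dict.fromkeys(level_indices) if vals[idx] is None]
--         for r in reversed(all_rows[:max(row_idx, 0)]):
--             if not missing:
--                 break
--             still = []
--             for idx in missing:
--                 v = get(r, idx)
--                 if v is not None and str(v).strip() != '':
--                     vals[idx] = v
--                 else: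
--                     still.append(idx)
--             missing = still
--
--     parts = []
--     for idx in level_indices:
--         v = vals[idx]
--         if v is not None and str(v).strip() != '':
--             parts.append(str(v).strip())
--     return '.'.join(parts)
-- ===== Notes on version B (the rewrite author's own statement) =====
-- stated objective: alternative
-- what changed: A restarts an upward scan over all_rows separately for every blank level column; B builds a per-column value dict from the row once, then walks the rows above in a single shared upward pass that fills all still-missing columns together and breaks as soon as none is missing.
import Mathlib
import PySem

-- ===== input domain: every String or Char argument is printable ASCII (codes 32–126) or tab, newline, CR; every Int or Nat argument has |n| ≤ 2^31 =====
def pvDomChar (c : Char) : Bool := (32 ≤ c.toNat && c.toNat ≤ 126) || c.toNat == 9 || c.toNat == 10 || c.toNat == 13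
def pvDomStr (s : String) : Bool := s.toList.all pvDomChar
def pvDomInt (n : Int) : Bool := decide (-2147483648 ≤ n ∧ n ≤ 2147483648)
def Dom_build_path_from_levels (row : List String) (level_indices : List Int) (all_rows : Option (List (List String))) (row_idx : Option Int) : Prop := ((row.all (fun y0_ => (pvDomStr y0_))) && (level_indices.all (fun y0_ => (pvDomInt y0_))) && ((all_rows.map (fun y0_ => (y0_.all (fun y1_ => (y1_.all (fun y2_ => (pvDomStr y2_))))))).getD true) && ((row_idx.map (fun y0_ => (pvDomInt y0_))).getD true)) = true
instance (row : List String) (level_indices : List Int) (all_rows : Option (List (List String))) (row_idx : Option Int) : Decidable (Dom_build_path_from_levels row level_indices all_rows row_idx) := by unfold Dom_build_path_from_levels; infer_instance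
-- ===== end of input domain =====

-- B replaces A's per-column upward scans with one shared upward pass: a dict of per-column values is
-- filled from the row, then the rows above are walked once (top row nearest first), filling all still-blank
-- columns together and stopping when none is missing (objective: alternative).

-- ===== PORT A =====
-- A's inner upward scan: for up_idx in range(row_idx-1, -1, -1): …; break on the first non-blank value.
def bpflLookupA (ars : List (List String)) (idx : Int) : List Int → Option String
  | [] => none
  | j :: rest =>
    if j < (ars.length : Int) then
      let r := (PySem.List.pyGet? ars j).getD []
      if idx < (r.length : Int) then
        match PySem.List.pyGet? r idx with
        | some up_val =>
          if PySem.Str.strip up_val ≠ "" then some up_val else bpflLookupA ars idx rest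
        | none => bpflLookupA ars idx rest  -- Python raises IndexError here (negative idx past the row start); excluded by Pre_
      else bpflLookupA ars idx rest
    else bpflLookupA ars idx rest

-- the body of A's 'for idx in level_indices' loop
def bpflStepA (row : List String) (all_rows : Option (List (List String))) (row_idx : Option Int) (path_parts : List String) (idx : Int) : List String :=
  let val : Option String := if idx < (row.length : Int) then PySem.List.pyGet? row idx else none
  -- Python raises IndexError when idx < -len(row) (pyGet? = none above); excluded by Pre_, the port keeps none
  let val : Option String :=
    match all_rows, row_idx with
    | some ars, some ri =>
      if val = none ∨ PySem.Str.strip (val.getD "") = "" then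
        match bpflLookupA ars idx (PySem.List.pyRange (ri - 1) (-1) (-1)) with
        | some u => some u
        | none => val
      else val
    | _, _ => val
  match val with
  | some s => if PySem.Str.strip s ≠ "" then path_parts ++ [PySem.Str.strip s] else path_parts
  | none => path_parts

def build_path_from_levels (row : List String) (level_indices : List Int) (all_rows : Option (List (List String))) (row_idx : Option Int) : String :=
  PySem.Str.join "." (level_indices.foldl (bpflStepA row all_rows row_idx) [])

-- ===== PORT B =====
-- Source B first pass: vals[idx] = v if the row value is non-blank else None (get = r[i] if -len<=i<len else None, i.e. pyGet?)
def bpflInit (row : List String) (d : PySem.Dict Int (Option String)) (idx : Int) : PySem.Dict Int (Option String) :=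
  match PySem.List.pyGet? row idx with
  | some v => if PySem.Str.strip v ≠ "" then d.insert idx (some v) else d.insert idx none
  | none => d.insert idx none

-- Source B inner loop body over the still-missing columns of one row above
def bpflRowStep (r : List String) (p : PySem.Dict Int (Option String) × List Int) (idx : Int) : PySem.Dict Int (Option String) × List Int :=
  match PySem.List.pyGet? r idx with
  | some v => if PySem.Str.strip v ≠ "" then (p.1.insert idx (some v), p.2) else (p.1, p.2 ++ [idx])
  | none => (p.1, p.2 ++ [idx])

-- Source B: for r in reversed(all_rows[:max(row_idx, 0)]): if not missing: break; …
def bpflScanB : List (List String) → PySem.Dict Int (Option String) → List Int → PySem.Dict Int (Option String)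
  | [], vals, _ => vals
  | r :: rest, vals, missing =>
    if missing = [] then vals
    else
      let p := missing.foldl (bpflRowStep r) (vals, [])
      bpflScanB rest p.1 p.2

-- the body of Source B's final 'for idx in level_indices' loop (vals[idx] is total: every idx is a key)
def bpflStepB (vals : PySem.Dict Int (Option String)) (parts : List String) (idx : Int) : List String :=
  match vals.getD idx none with
  | some v => if PySem.Str.strip v ≠ "" then parts ++ [PySem.Str.strip v] else parts
  | none => parts

def build_path_from_levels_alt (row : List String) (level_indices : List Int) (all_rows : Option (List (List String))) (row_idx : Option Int) : String :=
  let vals0 := level_indices.foldl (bpflInit row) PySem.Dict.empty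
  let vals :=
    match all_rows, row_idx with
    | some ars, some ri =>
      -- missing = [idx for idx in dict.fromkeys(level_indices) if vals[idx] is None]  (dict.fromkeys = ordered dedup)
      let missing := (PySem.List.dedup level_indices).filter (fun idx => (vals0.getD idx none).isNone)
      bpflScanB ((PySem.List.slice ars none (some (max ri 0))).reverse) vals0 missing
    | _, _ => vals0
  PySem.Str.join "." (level_indices.foldl (bpflStepB vals) [])

-- ===== PRECONDITION & SPEC =====
-- Pre_ holds exactly where the Python A returns: it excludes only the inputs on which A raises
-- IndexError — a level index below -len(row), or a negative level index whose (wrapped) row value is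
-- blank and whose upward scan hits a row shorter than |idx| before any non-blank value.
def Pre_build_path_from_levels (row : List String) (level_indices : List Int) (all_rows : Option (List (List String))) (row_idx : Option Int) : Prop :=
  ∀ idx ∈ level_indices, -(row.length : Int) ≤ idx ∧
    ((idx < 0 ∧ PySem.Str.strip ((PySem.List.pyGet? row idx).getD "") = "") →
      ∀ j < (all_rows.getD []).length, (((j : Int) < row_idx.getD 0 ∧ (((all_rows.getD [])[j]!).length : Int) < -idx) →
        ∃ j' < (all_rows.getD []).length, j < j' ∧ (j' : Int) < row_idx.getD 0 ∧
          -idx ≤ (((all_rows.getD [])[j']!).length : Int) ∧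
          PySem.Str.strip ((PySem.List.pyGet? ((all_rows.getD [])[j']!) idx).getD "") ≠ ""))
instance (row : List String) (level_indices : List Int) (all_rows : Option (List (List String))) (row_idx : Option Int) : Decidable (Pre_build_path_from_levels row level_indices all_rows row_idx) := by unfold Pre_build_path_from_levels; infer_instance

def pvWitness_build_path_from_levels : List String × List Int × Option (List (List String)) × Option Int :=
  (["a", ""], [0, 1], some [["x", "y"]], some 1)

def Spec_build_path_from_levels (row : List String) (level_indices : List Int) (all_rows : Option (List (List String))) (row_idx : Option Int) (out : String) : Prop := out = build_path_from_levels_alt row level_indices all_rows row_idx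
instance (row : List String) (level_indices : List Int) (all_rows : Option (List (List String))) (row_idx : Option Int) (out : String) : Decidable (Spec_build_path_from_levels row level_indices all_rows row_idx out) := by unfold Spec_build_path_from_levels; infer_instance

-- ===== CLAIM (what is proved, stated in full; the proofs are below) =====
def Claim_equal_build_path_from_levels : Prop := ∀ (row : List String) (level_indices : List Int) (all_rows : Option (List (List String))) (row_idx : Option Int), Dom_build_path_from_levels row level_indices all_rows row_idx → Pre_build_path_from_levels row level_indices all_rows row_idx → Spec_build_path_from_levels row level_indices all_rows row_idx (build_path_from_levels row level_indices all_rows row_idx)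

-- ===== LEMMAS AND PROOFS =====

theorem bpfl_pyGet?_none_of_ge {α : Type} (xs : List α) (i : Int) (h : ¬ i < (xs.length : Int)) :
    PySem.List.pyGet? xs i = none := by
  simp only [PySem.List.pyGet?, PySem.List.pyIdx?]
  split_ifs with h1 h2 <;> first | rfl | omega

theorem bpfl_val0_eq (row : List String) (idx : Int) :
    (if idx < (row.length : Int) then PySem.List.pyGet? row idx else none) = PySem.List.pyGet? row idx := by
  split_ifs with h
  · rfl
  · exact (bpfl_pyGet?_none_of_ge row idx h).symm

-- the non-blank value a single row contributes at column idx, if any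
def bpflHit (r : List String) (idx : Int) : Option String :=
  match PySem.List.pyGet? r idx with
  | some v => if PySem.Str.strip v ≠ "" then some v else none
  | none => none

-- carry-forward over a list of rows: the hit of the LAST row that has one, else the accumulator
def bpflG (idx : Int) (rows : List (List String)) (a : Option String) : Option String :=
  rows.foldl (fun acc r => match bpflHit r idx with | some v => some v | none => acc) a

-- first non-blank hit scanning a row list top-down
def bpflFirstHit (idx : Int) (rows : List (List String)) : Option String :=
  rows.findSome? (fun r => bpflHit r idx)

theorem bpfl_init_get_of_ne (row : List String) (d : PySem.Dict Int (Option String)) (i idx : Int) (h : idx ≠ i) :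
    (bpflInit row d i).getD idx none = d.getD idx none := by
  unfold bpflInit
  cases hg : PySem.List.pyGet? row i with
  | none => exact PySem.Dict.getD_insert_of_ne d none none h
  | some v =>
    show (if PySem.Str.strip v ≠ "" then d.insert i (some v) else d.insert i none).getD idx none = d.getD idx none
    split_ifs with hv
    · exact PySem.Dict.getD_insert_of_ne d (some v) none h
    · exact PySem.Dict.getD_insert_of_ne d none none h

theorem bpfl_init_get_self (row : List String) (d : PySem.Dict Int (Option String)) (idx : Int) :
    (bpflInit row d idx).getD idx none = bpflHit row idx := by
  unfold bpflInit bpflHit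
  cases hg : PySem.List.pyGet? row idx with
  | none => exact PySem.Dict.getD_insert_self d idx none none
  | some v =>
    show (if PySem.Str.strip v ≠ "" then d.insert idx (some v) else d.insert idx none).getD idx none =
      (if PySem.Str.strip v ≠ "" then some v else none)
    split_ifs with hv
    · exact PySem.Dict.getD_insert_self d idx (some v) none
    · exact PySem.Dict.getD_insert_self d idx none none

theorem bpfl_foldl_init_not_mem (row : List String) (idx : Int) :
    ∀ (l : List Int), idx ∉ l → ∀ d : PySem.Dict Int (Option String),
      (l.foldl (bpflInit row) d).getD idx none = d.getD idx none := by
  intro l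
  induction l with
  | nil => intro _ d; rfl
  | cons a l ih =>
    intro h d
    simp only [List.foldl_cons]
    rw [ih (fun hm => h (List.mem_cons_of_mem a hm))]
    exact bpfl_init_get_of_ne row d a idx (fun he => h (he ▸ List.mem_cons_self))

theorem bpfl_foldl_init_mem (row : List String) (idx : Int) :
    ∀ (l : List Int), idx ∈ l → ∀ d : PySem.Dict Int (Option String),
      (l.foldl (bpflInit row) d).getD idx none = bpflHit row idx := by
  intro l
  induction l with
  | nil => intro h; exact absurd h List.not_mem_nil
  | cons a l ih =>
    intro h d
    simp only [List.foldl_cons]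
    by_cases hm : idx ∈ l
    · exact ih hm _
    · have ha : idx = a := by
        rcases List.mem_cons.mp h with h1 | h1
        · exact h1
        · exact absurd h1 hm
      subst ha
      rw [bpfl_foldl_init_not_mem row idx l hm, bpfl_init_get_self]

theorem bpfl_rowfold_snd (r : List String) :
    ∀ (l : List Int) (p : PySem.Dict Int (Option String) × List Int),
      (l.foldl (bpflRowStep r) p).2 = p.2 ++ l.filter (fun i => (bpflHit r i).isNone) := by
  intro l
  induction l with
  | nil => intro p; simp
  | cons a l ih =>
    intro p
    simp only [List.foldl_cons, List.filter_cons]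
    rw [ih]
    unfold bpflRowStep bpflHit
    cases hg : PySem.List.pyGet? r a with
    | none => simp
    | some v =>
      by_cases hv : PySem.Str.strip v ≠ "" <;> simp [hv]

theorem bpfl_rowfold_fst_not_mem (r : List String) (idx : Int) :
    ∀ (l : List Int), idx ∉ l → ∀ p : PySem.Dict Int (Option String) × List Int,
      (l.foldl (bpflRowStep r) p).1.getD idx none = p.1.getD idx none := by
  intro l
  induction l with
  | nil => intro _ p; rfl
  | cons a l ih =>
    intro h p
    simp only [List.foldl_cons]
    rw [ih (fun hm => h (List.mem_cons_of_mem a hm))]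
    have ha : idx ≠ a := fun he => h (he ▸ List.mem_cons_self)
    unfold bpflRowStep
    cases hg : PySem.List.pyGet? r a with
    | none => rfl
    | some v =>
      show (if PySem.Str.strip v ≠ "" then (p.1.insert a (some v), p.2) else (p.1, p.2 ++ [a])).1.getD idx none = _
      split_ifs with hv
      · exact PySem.Dict.getD_insert_of_ne p.1 (some v) none ha
      · rfl

theorem bpfl_rowfold_fst_mem (r : List String) (idx : Int) :
    ∀ (l : List Int), idx ∈ l → ∀ p : PySem.Dict Int (Option String) × List Int,
      (l.foldl (bpflRowStep r) p).1.getD idx none =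
        match bpflHit r idx with | some v => some v | none => p.1.getD idx none := by
  intro l
  induction l with
  | nil => intro h; exact absurd h List.not_mem_nil
  | cons a l ih =>
    intro h p
    simp only [List.foldl_cons]
    by_cases hm : idx ∈ l
    · rw [ih hm]
      cases hh : bpflHit r idx with
      | some v => rfl
      | none =>
        simp only
        by_cases ha : idx = a
        · subst ha
          unfold bpflRowStep
          unfold bpflHit at hh
          cases hg : PySem.List.pyGet? r idx with
          | none => rfl
          | some v =>
            rw [hg] at hh
            have hv : ¬ PySem.Str.strip v ≠ "" := by
              intro hv; simp [hv] at hh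
            show (if PySem.Str.strip v ≠ "" then (p.1.insert idx (some v), p.2) else (p.1, p.2 ++ [idx])).1.getD idx none = _
            rw [if_neg hv]
        · unfold bpflRowStep
          cases hg : PySem.List.pyGet? r a with
          | none => rfl
          | some v =>
            show (if PySem.Str.strip v ≠ "" then (p.1.insert a (some v), p.2) else (p.1, p.2 ++ [a])).1.getD idx none = _
            split_ifs with hv
            · exact PySem.Dict.getD_insert_of_ne p.1 (some v) none ha
            · rfl
    · have ha : idx = a := by
        rcases List.mem_cons.mp h with h1 | h1
        · exact h1
        · exact absurd h1 hm
      subst ha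
      rw [bpfl_rowfold_fst_not_mem r idx l hm]
      unfold bpflRowStep bpflHit
      cases hg : PySem.List.pyGet? r idx with
      | none => rfl
      | some v =>
        show (if PySem.Str.strip v ≠ "" then (p.1.insert idx (some v), p.2) else (p.1, p.2 ++ [idx])).1.getD idx none =
          match (if PySem.Str.strip v ≠ "" then some v else none) with
          | some v => some v | none => p.1.getD idx none
        split_ifs with hv
        · exact PySem.Dict.getD_insert_self p.1 idx (some v) none
        · rfl

theorem bpfl_scanB_not_mem (idx : Int) :
    ∀ (rows : List (List String)) (vals : PySem.Dict Int (Option String)) (missing : List Int), idx ∉ missing →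
      (bpflScanB rows vals missing).getD idx none = vals.getD idx none := by
  intro rows
  induction rows with
  | nil => intro vals missing _; rfl
  | cons r rest ih =>
    intro vals missing h
    unfold bpflScanB
    split_ifs with hm
    · rfl
    · have hnotmem : idx ∉ missing.filter (fun i => (bpflHit r i).isNone) :=
        fun hmem => h (List.mem_of_mem_filter hmem)
      have hsnd := bpfl_rowfold_snd r missing (vals, ([] : List Int))
      simp only at hsnd
      rw [ih _ _ (by rw [hsnd]; simpa using hnotmem)]
      exact bpfl_rowfold_fst_not_mem r idx missing h (vals, [])

theorem bpfl_scanB_mem (idx : Int) :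
    ∀ (rows : List (List String)) (vals : PySem.Dict Int (Option String)) (missing : List Int), idx ∈ missing →
      (bpflScanB rows vals missing).getD idx none =
        match bpflFirstHit idx rows with | some v => some v | none => vals.getD idx none := by
  intro rows
  induction rows with
  | nil => intro vals missing _; rfl
  | cons r rest ih =>
    intro vals missing h
    unfold bpflScanB bpflFirstHit
    rw [if_neg (by intro he; rw [he] at h; exact absurd h List.not_mem_nil)]
    simp only [List.findSome?_cons]
    have hsnd := bpfl_rowfold_snd r missing (vals, ([] : List Int))
    have hfst := bpfl_rowfold_fst_mem r idx missing h (vals, [])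
    cases hh : bpflHit r idx with
    | some v =>
      have hnotmem : idx ∉ missing.filter (fun i => (bpflHit r i).isNone) := by
        intro hmem
        have := (List.mem_filter.mp hmem).2
        rw [hh] at this
        simp at this
      rw [bpfl_scanB_not_mem idx rest _ _ (by rw [hsnd]; simpa using hnotmem)]
      rw [hfst, hh]
    | none =>
      have hmem2 : idx ∈ missing.filter (fun i => (bpflHit r i).isNone) :=
        List.mem_filter.mpr ⟨h, by rw [hh]; rfl⟩
      rw [ih _ _ (by rw [hsnd]; simpa using hmem2)]
      rw [hfst, hh]
      unfold bpflFirstHit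
      rfl

-- first hit of the reversed list = carry-forward (last hit) of the list itself
theorem bpfl_firstHit_reverse (idx : Int) :
    ∀ (rows : List (List String)) (a : Option String),
      (match bpflFirstHit idx rows.reverse with | some v => some v | none => a) = bpflG idx rows a := by
  intro rows
  induction rows with
  | nil => intro a; rfl
  | cons r rest ih =>
    intro a
    unfold bpflFirstHit
    rw [List.reverse_cons, List.findSome?_append]
    have step : bpflG idx (r :: rest) a =
        bpflG idx rest (match bpflHit r idx with | some v => some v | none => a) := by
      simp only [bpflG, List.foldl_cons]
    rw [step, ← ih]
    unfold bpflFirstHit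
    cases List.findSome? (fun r => bpflHit r idx) rest.reverse with
    | some v => rfl
    | none =>
      simp only [List.findSome?_cons, List.findSome?_nil]
      cases bpflHit r idx <;> rfl

theorem bpfl_scan_eq (ars : List (List String)) (idx : Int) :
    ∀ (m : Nat), bpflLookupA ars idx (PySem.List.pyRange ((m : Int) - 1) (-1) (-1)) = bpflG idx (ars.take m) none := by
  intro m
  induction m with
  | zero =>
    rw [PySem.List.pyRange_neg_one_eq_nil (by omega)]
    rfl
  | succ m ih =>
    have hc : ((m + 1 : Nat) : Int) - 1 = (m : Int) := by push_cast; ring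
    rw [hc, PySem.List.pyRange_neg_one_cons (by omega)]
    by_cases hm : m < ars.length
    · have hguard : ((m : Int) < (ars.length : Int)) := by exact_mod_cast hm
      have hget : PySem.List.pyGet? ars (m : Int) = some ars[m] := by
        rw [PySem.List.pyGet?_natCast]; exact List.getElem?_eq_getElem hm
      have htake : ars.take (m + 1) = ars.take m ++ [ars[m]] := by
        rw [List.take_add_one, List.getElem?_eq_getElem hm]; rfl
      have hrhs : bpflG idx (ars.take (m + 1)) none =
          match bpflHit ars[m] idx with
          | some v => some v
          | none => bpflG idx (ars.take m) none := by
        rw [htake]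
        simp only [bpflG, List.foldl_append, List.foldl_cons, List.foldl_nil]
      rw [hrhs]
      show (if (m : Int) < (ars.length : Int) then _ else _) = _
      rw [if_pos hguard, hget]
      simp only [Option.getD_some]
      by_cases hi : idx < ((ars[m]).length : Int)
      · rw [if_pos hi]
        unfold bpflHit
        cases hg : PySem.List.pyGet? ars[m] idx with
        | none => simpa using ih
        | some v =>
          simp only
          split_ifs with hv
          · rfl
          · simpa using ih
      · rw [if_neg hi]
        unfold bpflHit
        rw [bpfl_pyGet?_none_of_ge _ idx hi]
        simpa using ih
    · have hguard : ¬ ((m : Int) < (ars.length : Int)) := by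
        intro hcon; exact hm (by exact_mod_cast hcon)
      have h1 : ars.take (m + 1) = ars := List.take_of_length_le (by omega)
      have h2 : ars.take m = ars := List.take_of_length_le (by omega)
      show (if (m : Int) < (ars.length : Int) then _ else _) = _
      rw [if_neg hguard, h1]
      exact ih.trans (by rw [h2])

-- A's upward scan = first hit in the reversed row prefix
theorem bpfl_lookupA_eq_firstHit (ars : List (List String)) (idx : Int) (ri : Int) :
    bpflLookupA ars idx (PySem.List.pyRange (ri - 1) (-1) (-1)) =
      bpflFirstHit idx ((PySem.List.slice ars none (some (max ri 0))).reverse) := by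
  have hrev := bpfl_firstHit_reverse idx (PySem.List.slice ars none (some (max ri 0))) none
  by_cases hri : 0 < ri
  · have hmax : max ri 0 = ri := by omega
    have hc : ((ri.toNat : Int)) = ri := Int.toNat_of_nonneg (by omega)
    have hs := bpfl_scan_eq ars idx ri.toNat
    rw [hc] at hs
    rw [hmax, PySem.List.slice_to ars (by omega)] at hrev ⊢
    rw [hs, ← hrev]
    cases bpflFirstHit idx (ars.take ri.toNat).reverse <;> rfl
  · have hmax : max ri 0 = 0 := by omega
    rw [hmax, PySem.List.slice_to ars (by omega)]
    rw [PySem.List.pyRange_neg_one_eq_nil (by omega)]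
    rfl

-- the value B's final pass reads for a column idx of level_indices
theorem bpfl_valsB_eq (row : List String) (lvl : List Int) (ars : List (List String)) (ri : Int)
    (idx : Int) (h : idx ∈ lvl) :
    (bpflScanB ((PySem.List.slice ars none (some (max ri 0))).reverse)
        (lvl.foldl (bpflInit row) PySem.Dict.empty)
        ((PySem.List.dedup lvl).filter (fun i => ((lvl.foldl (bpflInit row) PySem.Dict.empty).getD i none).isNone))).getD idx none =
      match bpflHit row idx with
      | some v => some v
      | none =>
        match bpflLookupA ars idx (PySem.List.pyRange (ri - 1) (-1) (-1)) with
        | some u => some u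
        | none => none := by
  have h0 : (lvl.foldl (bpflInit row) PySem.Dict.empty).getD idx none = bpflHit row idx :=
    bpfl_foldl_init_mem row idx lvl h _
  cases hh : bpflHit row idx with
  | some v =>
    have hnm : idx ∉ (PySem.List.dedup lvl).filter (fun i => ((lvl.foldl (bpflInit row) PySem.Dict.empty).getD i none).isNone) := by
      intro hmem
      have := (List.mem_filter.mp hmem).2
      rw [h0, hh] at this
      simp at this
    rw [bpfl_scanB_not_mem idx _ _ _ hnm, h0, hh]
  | none =>
    have hm : idx ∈ (PySem.List.dedup lvl).filter (fun i => ((lvl.foldl (bpflInit row) PySem.Dict.empty).getD i none).isNone) := by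
      refine List.mem_filter.mpr ⟨?_, by rw [h0, hh]; rfl⟩
      rw [PySem.List.mem_dedup]
      exact h
    rw [bpfl_scanB_mem idx _ _ _ hm, ← bpfl_lookupA_eq_firstHit ars idx ri]
    cases bpflLookupA ars idx (PySem.List.pyRange (ri - 1) (-1) (-1)) with
    | some u => rfl
    | none => rw [h0, hh]

theorem bpfl_step_eq (row : List String) (lvl : List Int) (all_rows : Option (List (List String))) (row_idx : Option Int)
    (parts : List String) (idx : Int) (h : idx ∈ lvl) :
    bpflStepA row all_rows row_idx parts idx =
      bpflStepB
        (match all_rows, row_idx with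
         | some ars, some ri =>
           bpflScanB ((PySem.List.slice ars none (some (max ri 0))).reverse)
             (lvl.foldl (bpflInit row) PySem.Dict.empty)
             ((PySem.List.dedup lvl).filter (fun i => ((lvl.foldl (bpflInit row) PySem.Dict.empty).getD i none).isNone))
         | _, _ => lvl.foldl (bpflInit row) PySem.Dict.empty)
        parts idx := by
  unfold bpflStepA bpflStepB
  rw [bpfl_val0_eq]
  cases all_rows with
  | none =>
    cases row_idx <;>
    · rw [bpfl_foldl_init_mem row idx lvl h]
      unfold bpflHit
      cases hg : PySem.List.pyGet? row idx with
      | none => rfl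
      | some s => by_cases he : PySem.Str.strip s = "" <;> simp [he]
  | some ars =>
    cases row_idx with
    | none =>
      rw [bpfl_foldl_init_mem row idx lvl h]
      unfold bpflHit
      cases hg : PySem.List.pyGet? row idx with
      | none => rfl
      | some s => by_cases he : PySem.Str.strip s = "" <;> simp [he]
    | some ri =>
      rw [bpfl_valsB_eq row lvl ars ri idx h]
      unfold bpflHit
      cases hL : bpflLookupA ars idx (PySem.List.pyRange (ri - 1) (-1) (-1)) with
      | none =>
        cases hg : PySem.List.pyGet? row idx with
        | none => simp [hL]
        | some s => by_cases he : PySem.Str.strip s = "" <;> simp [he, hL]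
      | some u =>
        cases hg : PySem.List.pyGet? row idx with
        | none => simp [hL]
        | some s => by_cases he : PySem.Str.strip s = "" <;> simp [he, hL]

-- ===== VERDICT (by name: the statement is the Claim_ definition above) =====
theorem build_path_from_levels_spec : Claim_equal_build_path_from_levels := by
  unfold Claim_equal_build_path_from_levels
  intro row level_indices all_rows row_idx _ _
  unfold Spec_build_path_from_levels build_path_from_levels build_path_from_levels_alt
  congr 1
  exact PySem.List.foldl_congr_mem level_indices _ _ []
    (fun parts idx hidx => bpfl_step_eq row level_indices all_rows row_idx parts idx hidx)
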